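-- pv_equiv track=rewrite | github.com/shimaw28/atcoder_practice | practice/abc140d.py | count_happy
-- ===== SOURCE A (Python) =====
-- def count_happy(s):
--     counter=False
--     happy = 0
--     for si in s:
--         if si == "R" and counter:
--             happy += 1
--         elif si == "R":
--             counter=True
--         else:
--             counter=False
--     counter = False
--     for si in s[::-1]:
--         if si == "L" and counter:
--             happy += 1
--         elif si == "L":
--             counter=True
--         else:
--             counter=False
--     return happy
-- ===== SOURCE B (Python) =====
-- def count_happy(s):
--     return sum(1 for a, b in zip(s, s[1:]) if a == b and a in "RL")
-- ===== Notes on version B (the rewrite author's own statement) =====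
-- stated objective: simpler
-- what changed: Replaces A's two stateful flag passes (forward for RR, reversed for LL) by one pass over adjacent character pairs counting equal R/L pairs.
import Mathlib
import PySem

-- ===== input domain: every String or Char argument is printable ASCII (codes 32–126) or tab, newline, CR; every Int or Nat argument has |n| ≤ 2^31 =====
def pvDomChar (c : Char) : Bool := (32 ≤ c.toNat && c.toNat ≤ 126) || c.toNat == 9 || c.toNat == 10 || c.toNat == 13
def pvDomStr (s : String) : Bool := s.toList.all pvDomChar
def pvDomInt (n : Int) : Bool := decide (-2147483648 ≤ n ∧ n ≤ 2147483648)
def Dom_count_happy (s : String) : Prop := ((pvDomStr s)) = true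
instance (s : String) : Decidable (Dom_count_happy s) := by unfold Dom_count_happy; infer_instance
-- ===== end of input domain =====

-- B replaces A's two stateful flag passes (forward for RR, reversed for LL) by one
-- single pass over adjacent character pairs counting equal R/L pairs; objective: simpler.

-- ===== PORT A =====
-- s[::-1] is the reversed string (PySem.List.slice?_none_none_neg_one); iterating over it
-- is iterating over s.toList.reverse.
def count_happy (s : String) : Int :=
  let st1 : Bool × Int := s.toList.foldl
    (fun (st : Bool × Int) si =>
      if si = 'R' ∧ st.1 then (st.1, st.2 + 1)
      else if si = 'R' then (true, st.2)
      else (false, st.2))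
    (false, 0)
  let st2 : Bool × Int := s.toList.reverse.foldl
    (fun (st : Bool × Int) si =>
      if si = 'L' ∧ st.1 then (st.1, st.2 + 1)
      else if si = 'L' then (true, st.2)
      else (false, st.2))
    (false, st1.2)
  st2.2

-- ===== PORT B =====
def count_happy_alt (s : String) : Int :=
  let l := s.toList
  (l.zip l.tail).foldl
    (fun (acc : Int) (p : Char × Char) =>
      if p.1 = p.2 ∧ (p.1 = 'R' ∨ p.1 = 'L') then acc + 1 else acc)
    0

-- ===== PRECONDITION & SPEC =====
def Spec_count_happy (s : String) (out : Int) : Prop := out = count_happy_alt s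
instance (s : String) (out : Int) : Decidable (Spec_count_happy s out) := by unfold Spec_count_happy; infer_instance

-- ===== CLAIM (what is proved, stated in full; the proofs are below) =====
def Claim_equal_count_happy : Prop := ∀ (s : String), Dom_count_happy s → Spec_count_happy s (count_happy s)

-- ===== LEMMAS AND PROOFS =====

-- count of adjacent pairs satisfying p, scanning xs with previous character x
def cnt2 (p : Char → Char → Bool) : Char → List Char → Int
  | _, [] => 0
  | x, y :: ys => (if p x y then 1 else 0) + cnt2 p y ys

-- count of adjacent pairs satisfying p in a list
def pc (p : Char → Char → Bool) : List Char → Int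
  | [] => 0
  | x :: xs => cnt2 p x xs

def pR (a b : Char) : Bool := a = 'R' && b = 'R'
def pL (a b : Char) : Bool := a = 'L' && b = 'L'
def pB (a b : Char) : Bool := decide (a = b ∧ (a = 'R' ∨ a = 'L'))

-- value of A's flag loop, as a recursion on the list with the flag as state
def cntc (ch : Char) : Bool → List Char → Int
  | _, [] => 0
  | c, x :: xs => (if x = ch ∧ c = true then 1 else 0) + cntc ch (decide (x = ch)) xs

theorem loopA (ch : Char) (l : List Char) : ∀ (c : Bool) (h : Int),
    (l.foldl (fun (st : Bool × Int) si =>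
      if si = ch ∧ st.1 then (st.1, st.2 + 1)
      else if si = ch then (true, st.2)
      else (false, st.2)) (c, h)).2 = h + cntc ch c l := by
  induction l with
  | nil => intro c h; simp [cntc]
  | cons x xs ih =>
    intro c h
    by_cases h1 : x = ch ∧ c = true
    · obtain ⟨hx, hc⟩ := h1
      simp [List.foldl_cons, hx, hc, ih, cntc]
      ring
    · by_cases h2 : x = ch
      · have hc : c = false := by
          cases c with
          | true => exact absurd ⟨h2, rfl⟩ h1
          | false => rfl
        subst hc
        simp [List.foldl_cons, h2, ih, cntc]
      · simp [List.foldl_cons, h2, ih, cntc]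

theorem cntc_eq_cnt2 (ch : Char) (xs : List Char) : ∀ (x : Char),
    cntc ch (decide (x = ch)) xs = cnt2 (fun a b => decide (a = ch) && decide (b = ch)) x xs := by
  induction xs with
  | nil => intro x; simp [cntc, cnt2]
  | cons y ys ih =>
    intro x
    simp only [cntc, cnt2, ih y]
    congr 1
    by_cases hx : x = ch <;> by_cases hy : y = ch <;> simp [hx, hy]

theorem cntc_false (ch : Char) (l : List Char) :
    cntc ch false l = pc (fun a b => decide (a = ch) && decide (b = ch)) l := by
  cases l with
  | nil => simp [cntc, pc]
  | cons x xs =>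
    simp only [cntc, pc]
    have : (if x = ch ∧ false = true then (1 : Int) else 0) = 0 := by simp
    rw [this, cntc_eq_cnt2, zero_add]

theorem cnt2_append (p : Char → Char → Bool) (ys : List Char) : ∀ (x z : Char),
    cnt2 p x (ys ++ [z]) = cnt2 p x ys + (if p (ys.getLastD x) z then 1 else 0) := by
  induction ys with
  | nil => intro x z; simp [cnt2]
  | cons y ys ih =>
    intro x z
    simp only [List.cons_append, cnt2, ih y, List.getLastD_cons]
    ring

theorem pc_cons (p : Char → Char → Bool) (x : Char) (xs : List Char) :
    pc p (x :: xs) = cnt2 p x xs := rfl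

theorem pc_reverse (p : Char → Char → Bool) (hsym : ∀ a b, p a b = p b a) (l : List Char) :
    pc p l.reverse = pc p l := by
  induction l with
  | nil => rfl
  | cons x xs ih =>
    cases xs with
    | nil => rfl
    | cons y ys =>
      have hrev : (y :: ys).reverse ≠ [] := by simp
      obtain ⟨w, ws, hw⟩ := List.exists_cons_of_ne_nil hrev
      have h1 : (x :: y :: ys).reverse = w :: (ws ++ [x]) := by
        rw [List.reverse_cons, hw]; rfl
      have hsome : (w :: ws).getLast? = some y := by
        rw [← hw, List.getLast?_reverse]; rfl
      have hlast : ws.getLastD w = y := by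
        have h5 : (w :: ws).getLastD w = y := by
          rw [List.getLastD_eq_getLast?, hsome]; rfl
        rw [← h5, List.getLastD_cons]
      have h6 : cnt2 p w ws = pc p (y :: ys) := by
        rw [← ih, hw, pc_cons]
      rw [h1, pc_cons, cnt2_append, hlast, h6, pc_cons,
        show pc p (x :: y :: ys) = (if p x y then (1:Int) else 0) + cnt2 p y ys from rfl,
        hsym y x]
      ring

theorem zipfold (xs : List Char) : ∀ (x : Char) (a : Int),
    (((x :: xs).zip xs).foldl
      (fun (acc : Int) (p : Char × Char) =>
        if p.1 = p.2 ∧ (p.1 = 'R' ∨ p.1 = 'L') then acc + 1 else acc) a)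
      = a + cnt2 pB x xs := by
  induction xs with
  | nil => intro x a; simp [cnt2]
  | cons y ys ih =>
    intro x a
    simp only [List.zip_cons_cons, List.foldl_cons, ih y, cnt2, pB]
    by_cases h : x = y ∧ (x = 'R' ∨ x = 'L')
    · simp [h]; split_ifs <;> omega
    · simp [h]

theorem cnt2_split (xs : List Char) : ∀ (x : Char),
    cnt2 pB x xs = cnt2 pR x xs + cnt2 pL x xs := by
  induction xs with
  | nil => intro x; simp [cnt2]
  | cons y ys ih =>
    intro x
    simp only [cnt2, ih y]
    have : (if pB x y then (1:Int) else 0) = (if pR x y then 1 else 0) + (if pL x y then 1 else 0) := by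
      by_cases h1 : x = y
      · subst h1
        by_cases h2 : x = 'R' <;> by_cases h3 : x = 'L' <;> simp_all [pB, pR, pL]
      · have hR : ¬(x = 'R' ∧ y = 'R') := fun h => h1 (h.1.trans h.2.symm)
        have hL : ¬(x = 'L' ∧ y = 'L') := fun h => h1 (h.1.trans h.2.symm)
        simp [pB, pR, pL, h1, hR, hL]
    rw [this]; ring

-- ===== VERDICT (by name: the statement is the Claim_ definition above) =====
theorem count_happy_spec : Claim_equal_count_happy := by
  intro s _
  unfold Spec_count_happy count_happy count_happy_alt
  simp only []
  rw [loopA, loopA, cntc_false, cntc_false]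
  show (0 : Int) + pc _ s.toList + pc _ s.toList.reverse
      = (s.toList.zip s.toList.tail).foldl _ 0
  have hrev : pc (fun a b => decide (a = 'L') && decide (b = 'L')) s.toList.reverse
      = pc (fun a b => decide (a = 'L') && decide (b = 'L')) s.toList := by
    apply pc_reverse
    intro a b
    by_cases h1 : a = 'L' <;> by_cases h2 : b = 'L' <;> simp [h1, h2]
  rw [hrev]
  cases hl : s.toList with
  | nil => simp [pc]
  | cons x xs =>
    have : (x :: xs).tail = xs := rfl
    rw [this, zipfold]
    simp only [pc, cnt2_split]
    have e1 : cnt2 (fun a b => decide (a = 'R') && decide (b = 'R')) x xs = cnt2 pR x xs := rfl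
    have e2 : cnt2 (fun a b => decide (a = 'L') && decide (b = 'L')) x xs = cnt2 pL x xs := rfl
    rw [e1, e2]; ring
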